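-- pv_equiv track=rewrite | github.com/MrBrantCode/unitest_baseline | mut_generate/mist_train_cf/cf_20460/solution.py | countDivisible
-- ===== SOURCE A (Python) =====
-- def countDivisible(arr, k, m):
--     count = 0
--
--     if len(arr) == 0:
--         return count
--
--     for element in arr[0]:
--         if element % k == 0 and element % m == 1:
--             count += 1
--
--     return count + countDivisible(arr[1:], k, m)
-- ===== SOURCE B (Python) =====
-- def countDivisible(arr, k, m):
--     flat = []
--     for sub in arr:
--         flat.extend(sub)
--     matches = [e for e in flat if e % k == 0 and e % m == 1]
--     return len(matches)
-- ===== Notes on version B (the rewrite author's own statement) =====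
-- stated objective: alternative
-- what changed: Replaces the recursion on arr[1:] with two staged passes: first flatten all sublists into one list, then count the matching elements of the flat list with a filter.
import Mathlib
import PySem

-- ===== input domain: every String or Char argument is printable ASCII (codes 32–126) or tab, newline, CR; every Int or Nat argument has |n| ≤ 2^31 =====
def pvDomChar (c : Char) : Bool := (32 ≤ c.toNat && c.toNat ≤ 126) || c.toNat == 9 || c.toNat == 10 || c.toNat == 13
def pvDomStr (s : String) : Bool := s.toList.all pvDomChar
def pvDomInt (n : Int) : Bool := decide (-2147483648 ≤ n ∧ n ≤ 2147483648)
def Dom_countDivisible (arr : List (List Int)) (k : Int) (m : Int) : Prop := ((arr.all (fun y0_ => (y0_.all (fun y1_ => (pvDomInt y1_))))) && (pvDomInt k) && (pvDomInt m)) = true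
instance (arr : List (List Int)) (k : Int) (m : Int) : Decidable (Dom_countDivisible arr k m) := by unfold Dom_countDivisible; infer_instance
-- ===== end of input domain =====

-- B replaces A's recursion on arr[1:] with two staged passes — flatten everything into
-- one list, then count matches by filtering it (objective: alternative). Return value only.

-- ===== PORT A =====
-- A: if arr is empty return 0; else count matches in arr[0] and recurse on arr[1:].
def countDivisible (arr : List (List Int)) (k : Int) (m : Int) : Int :=
  match arr with
  | [] => 0
  | first :: rest =>
    (first.foldl (fun count e =>
        if PySem.Int.mod e k = 0 ∧ PySem.Int.mod e m = 1 then count + 1 else count) 0)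
      + countDivisible rest k m

-- ===== PORT B =====
-- B: flat = []; for sub in arr: flat.extend(sub); return len([e for e in flat if …]).
def countDivisible_alt (arr : List (List Int)) (k : Int) (m : Int) : Int :=
  let flat := arr.foldl (fun acc sub => acc ++ sub) []
  let hits := flat.filter (fun e =>
    decide (PySem.Int.mod e k = 0 ∧ PySem.Int.mod e m = 1))
  (hits.length : Int)

-- ===== PRECONDITION & SPEC =====
-- Pre_ excludes exactly the inputs on which Python A raises ZeroDivisionError:
-- k = 0 with some element present, or m = 0 reached because some element is divisible by k
-- (the `and` short-circuits, so m = 0 is harmless if no element is divisible by k).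
def Pre_countDivisible (arr : List (List Int)) (k : Int) (m : Int) : Prop :=
  ∀ sub ∈ arr, ∀ e ∈ sub, k ≠ 0 ∧ (k ∣ e → m ≠ 0)
instance (arr : List (List Int)) (k : Int) (m : Int) : Decidable (Pre_countDivisible arr k m) := by unfold Pre_countDivisible; infer_instance
def pvWitness_countDivisible : List (List Int) × Int × Int := ([[6, 7], [11]], 2, 5)

def Spec_countDivisible (arr : List (List Int)) (k : Int) (m : Int) (out : Int) : Prop := out = countDivisible_alt arr k m
instance (arr : List (List Int)) (k : Int) (m : Int) (out : Int) : Decidable (Spec_countDivisible arr k m out) := by unfold Spec_countDivisible; infer_instance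

-- ===== CLAIM (what is proved, stated in full; the proofs are below) =====
def Claim_equal_countDivisible : Prop := ∀ (arr : List (List Int)) (k : Int) (m : Int), Dom_countDivisible arr k m → Pre_countDivisible arr k m → Spec_countDivisible arr k m (countDivisible arr k m)

-- ===== LEMMAS AND PROOFS =====

-- A's inner counting fold (from any initial count) equals count plus the filtered length
theorem inner_fold_eq_filter (k m : Int) (l : List Int) (c : Int) :
    l.foldl (fun count e =>
      if PySem.Int.mod e k = 0 ∧ PySem.Int.mod e m = 1 then count + 1 else count) c
    = c + ((l.filter (fun e =>
        decide (PySem.Int.mod e k = 0 ∧ PySem.Int.mod e m = 1))).length : Int) := by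
  induction l generalizing c with
  | nil => simp
  | cons a t ih =>
    simp only [List.foldl_cons, List.filter_cons]
    by_cases h : PySem.Int.mod a k = 0 ∧ PySem.Int.mod a m = 1
    · simp [ih, h]; ring
    · simp [ih, h]

-- B's accumulating flatten equals flatten (with any initial accumulator)
theorem foldl_append_eq_flatten (arr : List (List Int)) (acc : List Int) :
    arr.foldl (fun acc sub => acc ++ sub) acc = acc ++ arr.flatten := by
  induction arr generalizing acc with
  | nil => simp
  | cons a t ih => simp [List.foldl_cons, ih]

theorem countDivisible_eq_alt (arr : List (List Int)) (k m : Int) :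
    countDivisible arr k m = countDivisible_alt arr k m := by
  induction arr with
  | nil => rfl
  | cons a t ih =>
    simp only [countDivisible, countDivisible_alt, foldl_append_eq_flatten, List.nil_append] at *
    rw [inner_fold_eq_filter, ih]
    simp [List.filter_append]

-- ===== VERDICT (by name: the statement is the Claim_ definition above) =====
theorem countDivisible_spec : Claim_equal_countDivisible := by
  intro arr k m _ _
  exact countDivisible_eq_alt arr k m
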